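-- pv_equiv track=rewrite | github.com/VillalvaLijo/Udemy-Python-Course | Udemy_function_practice_7_12_19.py | summer_69
-- ===== SOURCE A (Python) =====
-- def summer_69(arr):
--     sum_69 = 0
--     count = 0
--     for _ in arr:
--         if _ != 6 and count == 0:
--             sum_69 += _
--         elif _ == 6 and count == 0:
--             count += 1
--         elif count == 1 and _ != 9:        #qualify that _ does not equal 9, or loop will
--                                            #skip without writing
--             pass
--         elif _==9 and count == 1:
--             count += 1
--         elif count == 2:
--             sum_69 += _
--     return sum_69
-- ===== SOURCE B (Python) =====
-- def summer_69(arr):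
--     arr = list(arr)
--     try:
--         i = arr.index(6)
--     except ValueError:
--         return sum(arr)
--     for j in range(i + 1, len(arr)):
--         if arr[j] == 9:
--             return sum(arr[:i]) + sum(arr[j + 1:])
--     return sum(arr[:i])
-- ===== Notes on version B (the rewrite author's own statement) =====
-- stated objective: simpler
-- what changed: Replaces A's stateful count-machine fold with locating the first 6 and the first 9 after it, then summing the two slices outside that segment.
import Mathlib
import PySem

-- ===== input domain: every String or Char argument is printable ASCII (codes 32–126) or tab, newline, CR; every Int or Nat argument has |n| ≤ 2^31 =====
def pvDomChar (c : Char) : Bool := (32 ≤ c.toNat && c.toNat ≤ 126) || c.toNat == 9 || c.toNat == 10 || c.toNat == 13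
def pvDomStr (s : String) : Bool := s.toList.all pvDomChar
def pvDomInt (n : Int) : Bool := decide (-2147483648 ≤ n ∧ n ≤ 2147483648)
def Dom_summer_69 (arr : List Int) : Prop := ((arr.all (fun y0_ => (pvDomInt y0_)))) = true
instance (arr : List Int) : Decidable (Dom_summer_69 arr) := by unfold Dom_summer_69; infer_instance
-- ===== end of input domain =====

-- B: locate the first 6 and the first 9 after it, then sum the two slices outside the segment (simpler decomposition; return value equal to A's).

-- ===== PORT A =====
-- step of A's for-loop: state (sum_69, count), branches in the source order
def summer_69_step (s : Int × Int) (x : Int) : Int × Int :=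
  if x ≠ 6 ∧ s.2 = 0 then (s.1 + x, s.2)
  else if x = 6 ∧ s.2 = 0 then (s.1, s.2 + 1)
  else if s.2 = 1 ∧ x ≠ 9 then s
  else if x = 9 ∧ s.2 = 1 then (s.1, s.2 + 1)
  else if s.2 = 2 then (s.1 + x, s.2)
  else s

def summer_69 (arr : List Int) : Int :=
  (arr.foldl summer_69_step (0, 0)).1

-- ===== PORT B =====
-- Source B's 'for j in range(i+1, len(arr)): if arr[j] == 9: …' — first index ≥ j holding 9
def summer_69_find9 (arr : List Int) (j : Nat) : Option Nat :=
  if h : j < arr.length then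
    if arr[j] = 9 then some j else summer_69_find9 arr (j + 1)
  else none
termination_by arr.length - j

def summer_69_alt (arr : List Int) : Int :=
  match PySem.List.index? arr 6 with
  | none => arr.sum
  | some i =>
    match summer_69_find9 arr (i + 1) with
    | some j => (PySem.List.slice arr none (some (i : Int))).sum
                + (PySem.List.slice arr (some ((j : Int) + 1)) none).sum
    | none => (PySem.List.slice arr none (some (i : Int))).sum

-- ===== PRECONDITION & SPEC =====
def Spec_summer_69 (arr : List Int) (out : Int) : Prop := out = summer_69_alt arr
instance (arr : List Int) (out : Int) : Decidable (Spec_summer_69 arr out) := by unfold Spec_summer_69; infer_instance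

-- ===== CLAIM (what is proved, stated in full; the proofs are below) =====
def Claim_equal_summer_69 : Prop := ∀ (arr : List Int), Dom_summer_69 arr → Spec_summer_69 arr (summer_69 arr)

-- ===== LEMMAS AND PROOFS =====

-- value of A's fold once count = 2: everything is added
theorem fold_two (l : List Int) (s : Int) :
    (l.foldl summer_69_step (s, 2)).1 = s + l.sum := by
  induction l generalizing s with
  | nil => simp
  | cons x xs ih => simp [summer_69_step, ih]; ring

-- value of A's fold once count = 1: skip up to and including the first 9
theorem fold_one (l : List Int) (s : Int) :
    (l.foldl summer_69_step (s, 1)).1 =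
      s + (match PySem.List.index? l 9 with
           | none => 0
           | some k => (l.drop (k + 1)).sum) := by
  induction l generalizing s with
  | nil => simp [PySem.List.index?]
  | cons x xs ih =>
    simp only [List.foldl_cons]
    by_cases hx : x = 9
    · subst hx
      rw [PySem.List.index?_cons_self]
      have h : summer_69_step (s, 1) 9 = (s, 2) := by simp [summer_69_step]
      rw [h, fold_two]
      simp
    · rw [PySem.List.index?_cons_of_ne _ hx]
      have h : summer_69_step (s, 1) x = (s, 1) := by simp [summer_69_step, hx]
      rw [h, ih]
      cases PySem.List.index? xs 9 with
      | none => simp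
      | some k => simp [List.drop_succ_cons]

-- value of A's fold with count = 0, phrased through index? / take / drop
theorem fold_zero (l : List Int) (s : Int) :
    (l.foldl summer_69_step (s, 0)).1 =
      s + (match PySem.List.index? l 6 with
           | none => l.sum
           | some i =>
             (l.take i).sum +
               (match PySem.List.index? (l.drop (i + 1)) 9 with
                | none => 0
                | some k => ((l.drop (i + 1)).drop (k + 1)).sum)) := by
  induction l generalizing s with
  | nil => simp [PySem.List.index?]
  | cons x xs ih =>
    simp only [List.foldl_cons]
    by_cases hx : x = 6
    · subst hx
      rw [PySem.List.index?_cons_self]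
      have h : summer_69_step (s, 0) 6 = (s, 1) := by simp [summer_69_step]
      rw [h, fold_one]
      simp
    · rw [PySem.List.index?_cons_of_ne _ hx]
      have h : summer_69_step (s, 0) x = (s + x, 0) := by simp [summer_69_step, hx]
      rw [h, ih]
      cases PySem.List.index? xs 6 with
      | none => simp; ring
      | some i =>
        simp only [Option.map_some, List.take_succ_cons, List.drop_succ_cons, List.sum_cons]
        ring

-- B's index scan is index? on the dropped suffix, shifted by j
theorem find9_eq (arr : List Int) (j : Nat) :
    summer_69_find9 arr j = (PySem.List.index? (arr.drop j) 9).map (· + j) := by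
  fun_induction summer_69_find9 arr j with
  | case1 j h h9 =>
    rw [List.drop_eq_getElem_cons h, h9, PySem.List.index?_cons_self]
    simp
  | case2 j h h9 ih =>
    rw [List.drop_eq_getElem_cons h,
        PySem.List.index?_cons_of_ne _ h9, ih]
    cases PySem.List.index? (arr.drop (j + 1)) 9
    · simp
    · simp
      omega
  | case3 j h =>
    rw [List.drop_eq_nil_of_le (by omega)]
    simp [PySem.List.index?]

-- ===== VERDICT (by name: the statement is the Claim_ definition above) =====
theorem summer_69_spec : Claim_equal_summer_69 := by
  intro arr _
  unfold Spec_summer_69 summer_69 summer_69_alt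
  rw [fold_zero]
  cases h6 : PySem.List.index? arr 6 with
  | none => simp
  | some i =>
    simp only
    rw [find9_eq]
    cases h9 : PySem.List.index? (arr.drop (i + 1)) 9 with
    | none => simp [PySem.List.slice_to_natCast]
    | some k =>
      simp only [Option.map_some]
      rw [PySem.List.slice_to_natCast]
      have : ((k + (i + 1) : Nat) : Int) + 1 = ((k + i + 2 : Nat) : Int) := by push_cast; ring
      rw [this, PySem.List.slice_from_natCast]
      simp [List.drop_drop]
      have harg : i + 1 + (k + 1) = k + i + 2 := by omega
      rw [harg]
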